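-- pv_equiv track=rewrite | github.com/sarimehmet6/RepoMind | repomind/scanners/repo_scanner.py | _compute_tight_coupling_pairs
-- ===== SOURCE A (Python) =====
-- def _compute_tight_coupling_pairs(circular_dependencies: list[list[str]]) -> list[list[str]]:
--     """Extract 2-node cycles (mutual imports) as sorted pairs. Deterministic."""
--     pairs: list[list[str]] = []
--     for cycle in circular_dependencies:
--         # Cycle is e.g. ["a", "b", "a"] for 2-node
--         if len(cycle) == 3 and cycle[0] == cycle[-1]:
--             a, b = cycle[0], cycle[1]
--             pair = sorted([a, b])
--             if pair not in pairs:
--                 pairs.append(pair)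
--     return sorted(pairs, key=lambda p: (p[0], p[1]))
-- ===== SOURCE B (Python) =====
-- def _compute_tight_coupling_pairs(circular_dependencies: list[list[str]]) -> list[list[str]]:
--     """Sort-then-dedup strategy: collect every qualifying pair with no membership
--     scan, sort the whole batch, then drop adjacent duplicates in one linear pass."""
--     all_pairs: list[list[str]] = []
--     for cycle in circular_dependencies:
--         if len(cycle) == 3 and cycle[0] == cycle[-1]:
--             a, b = cycle[0], cycle[1]
--             all_pairs.append([a, b] if a <= b else [b, a])
--     all_pairs.sort()
--     out: list[list[str]] = []
--     for p in all_pairs: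
--         if not out or out[-1] != p:
--             out.append(p)
--     return out
-- ===== Notes on version B (the rewrite author's own statement) =====
-- stated objective: alternative
-- what changed: A deduplicates during collection with a 'pair not in pairs' list scan and then sorts with a tuple key; B collects all qualifying pairs with no membership test, sorts the whole batch, and removes adjacent duplicates in one linear pass (sort-then-dedup).
import Mathlib
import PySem

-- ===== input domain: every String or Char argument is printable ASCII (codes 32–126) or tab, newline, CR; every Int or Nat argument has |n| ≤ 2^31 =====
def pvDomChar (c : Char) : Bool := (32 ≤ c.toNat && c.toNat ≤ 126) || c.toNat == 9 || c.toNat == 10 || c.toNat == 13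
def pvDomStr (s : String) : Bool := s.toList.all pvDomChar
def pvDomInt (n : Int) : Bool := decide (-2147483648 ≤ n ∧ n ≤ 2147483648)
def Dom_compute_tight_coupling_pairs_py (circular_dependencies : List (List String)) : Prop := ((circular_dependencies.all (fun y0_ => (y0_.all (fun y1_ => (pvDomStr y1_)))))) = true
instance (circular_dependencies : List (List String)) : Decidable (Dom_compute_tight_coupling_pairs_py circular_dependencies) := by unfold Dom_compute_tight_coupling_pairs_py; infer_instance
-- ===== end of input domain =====

-- B replaces A's per-pair 'pair not in pairs' membership scan by collecting all
-- qualifying pairs, sorting the batch, and dropping adjacent duplicates in one pass.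

-- ===== PORT A =====
def compute_tight_coupling_pairs_py (circular_dependencies : List (List String)) : List (List String) :=
  let pairs := circular_dependencies.foldl (fun pairs cycle =>
    if cycle.length = 3 ∧ PySem.List.pyGetD cycle 0 "" = PySem.List.pyGetD cycle (-1) "" then
      if pairs.contains (PySem.List.sorted [PySem.List.pyGetD cycle 0 "", PySem.List.pyGetD cycle 1 ""] (fun x => x) false) then pairs
      else pairs ++ [PySem.List.sorted [PySem.List.pyGetD cycle 0 "", PySem.List.pyGetD cycle 1 ""] (fun x => x) false]
    else pairs) []
  PySem.List.sorted2 pairs (fun p => PySem.List.pyGetD p 0 "") (fun p => PySem.List.pyGetD p 1 "") false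

-- ===== PORT B =====
def compute_tight_coupling_pairs_py_alt (circular_dependencies : List (List String)) : List (List String) :=
  let all_pairs := circular_dependencies.foldl (fun acc cycle =>
    if cycle.length = 3 ∧ PySem.List.pyGetD cycle 0 "" = PySem.List.pyGetD cycle (-1) "" then
      acc ++ [if PySem.List.pyGetD cycle 0 "" ≤ PySem.List.pyGetD cycle 1 ""
              then [PySem.List.pyGetD cycle 0 "", PySem.List.pyGetD cycle 1 ""]
              else [PySem.List.pyGetD cycle 1 "", PySem.List.pyGetD cycle 0 ""]]
    else acc) []
  let sorted_pairs := PySem.List.sorted all_pairs (fun x => x) false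
  sorted_pairs.foldl (fun out p =>
    if out = [] ∨ PySem.List.pyGetD out (-1) [] ≠ p then out ++ [p] else out) []

-- ===== PRECONDITION & SPEC =====
def Spec_compute_tight_coupling_pairs_py (circular_dependencies : List (List String)) (out : List (List String)) : Prop := out = compute_tight_coupling_pairs_py_alt circular_dependencies
instance (circular_dependencies : List (List String)) (out : List (List String)) : Decidable (Spec_compute_tight_coupling_pairs_py circular_dependencies out) := by unfold Spec_compute_tight_coupling_pairs_py; infer_instance

-- ===== CLAIM (what is proved, stated in full; the proofs are below) =====
def Claim_equal_compute_tight_coupling_pairs_py : Prop := ∀ (circular_dependencies : List (List String)), Dom_compute_tight_coupling_pairs_py circular_dependencies → Spec_compute_tight_coupling_pairs_py circular_dependencies (compute_tight_coupling_pairs_py circular_dependencies)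

-- ===== LEMMAS AND PROOFS =====

-- the sorted pair extracted from a qualifying 2-node cycle (proof-side helper)
def pvPairOf (cycle : List String) : Option (List String) :=
  match cycle with
  | [a, b, c] => if a = c then some (if a ≤ b then [a, b] else [b, a]) else none
  | _ => none

lemma pair_sorted (a b : String) :
    PySem.List.sorted [a, b] (fun x => x) false = if a ≤ b then [a, b] else [b, a] := by
  rcases le_or_gt a b with h | h
  · rw [if_pos h]
    simp only [PySem.List.sorted, List.foldl, PySem.List.insertBy]
    rw [if_neg (by simpa using not_lt.2 h)]
  · rw [if_neg (not_le.2 h)]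
    simp only [PySem.List.sorted, List.foldl, PySem.List.insertBy]
    rw [if_pos (by simpa using h)]

lemma stepA (pairs : List (List String)) (cycle : List String) :
    (if cycle.length = 3 ∧ PySem.List.pyGetD cycle 0 "" = PySem.List.pyGetD cycle (-1) "" then
      if pairs.contains (PySem.List.sorted [PySem.List.pyGetD cycle 0 "", PySem.List.pyGetD cycle 1 ""] (fun x => x) false) then pairs
      else pairs ++ [PySem.List.sorted [PySem.List.pyGetD cycle 0 "", PySem.List.pyGetD cycle 1 ""] (fun x => x) false]
    else pairs) = (pvPairOf cycle).elim pairs (PySem.Set.add pairs) := by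
  match cycle with
  | [] => simp [pvPairOf]
  | [a] => simp [pvPairOf]
  | [a, b] => simp [pvPairOf]
  | [a, b, c] =>
    by_cases h : a = c <;>
      simp [pvPairOf, h, pair_sorted, PySem.Set.add,
        PySem.List.pyGetD, PySem.List.pyGet?, PySem.List.pyIdx?]
  | a :: b :: c :: d :: t =>
    have h3 : ¬ ((a :: b :: c :: d :: t).length = 3 ∧
        PySem.List.pyGetD (a :: b :: c :: d :: t) 0 "" = PySem.List.pyGetD (a :: b :: c :: d :: t) (-1) "") := by
      rintro ⟨hl, -⟩; simp at hl
    rw [if_neg h3]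
    rfl

lemma stepB (acc : List (List String)) (cycle : List String) :
    (if cycle.length = 3 ∧ PySem.List.pyGetD cycle 0 "" = PySem.List.pyGetD cycle (-1) "" then
      acc ++ [if PySem.List.pyGetD cycle 0 "" ≤ PySem.List.pyGetD cycle 1 ""
              then [PySem.List.pyGetD cycle 0 "", PySem.List.pyGetD cycle 1 ""]
              else [PySem.List.pyGetD cycle 1 "", PySem.List.pyGetD cycle 0 ""]]
    else acc) = acc ++ (pvPairOf cycle).toList := by
  match cycle with
  | [] => simp [pvPairOf]
  | [a] => simp [pvPairOf]
  | [a, b] => simp [pvPairOf]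
  | [a, b, c] =>
    by_cases h : a = c <;>
      simp [pvPairOf, h, PySem.List.pyGetD, PySem.List.pyGet?, PySem.List.pyIdx?]
  | a :: b :: c :: d :: t =>
    have h3 : ¬ ((a :: b :: c :: d :: t).length = 3 ∧
        PySem.List.pyGetD (a :: b :: c :: d :: t) 0 "" = PySem.List.pyGetD (a :: b :: c :: d :: t) (-1) "") := by
      rintro ⟨hl, -⟩; simp at hl
    rw [if_neg h3]
    simp [pvPairOf]

lemma foldElim_eq (cds : List (List String)) : ∀ acc,
    cds.foldl (fun s c => (pvPairOf c).elim s (PySem.Set.add s)) acc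
      = (cds.filterMap pvPairOf).foldl PySem.Set.add acc := by
  induction cds with
  | nil => intro acc; rfl
  | cons c t ih =>
    intro acc
    rw [List.foldl_cons, List.filterMap_cons]
    cases h : pvPairOf c <;> simp [ih]

lemma foldToList_eq (cds : List (List String)) : ∀ acc,
    cds.foldl (fun s c => s ++ (pvPairOf c).toList) acc = acc ++ cds.filterMap pvPairOf := by
  induction cds with
  | nil => intro acc; simp
  | cons c t ih =>
    intro acc
    rw [List.foldl_cons, List.filterMap_cons]
    cases h : pvPairOf c with
    | none => simpa using ih acc
    | some v => simpa using ih (acc ++ [v])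

lemma pvPairOf_shape {cycle p : List String} (h : pvPairOf cycle = some p) :
    ∃ u v : String, p = [u, v] := by
  match cycle with
  | [] | [a] | [a, b] => simp [pvPairOf] at h
  | [a, b, c] =>
    by_cases hac : a = c
    · simp only [pvPairOf, if_pos hac, Option.some.injEq] at h
      split at h
      · exact ⟨a, b, h.symm⟩
      · exact ⟨b, a, h.symm⟩
    · simp [pvPairOf, hac] at h
  | a :: b :: c :: d :: t => simp [pvPairOf] at h

-- generic congruence for insertion sort under a predicate on the elements
lemma insertBy_congr {β : Type} (b1 b2 : β → β → Bool) (P : β → Prop)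
    (hb : ∀ a b, P a → P b → b1 a b = b2 a b) :
    ∀ (x : β) (ys : List β), P x → (∀ y ∈ ys, P y) →
      PySem.List.insertBy b1 x ys = PySem.List.insertBy b2 x ys := by
  intro x ys
  induction ys with
  | nil => intro _ _; rfl
  | cons y t ih =>
    intro hx hys
    simp only [PySem.List.insertBy]
    rw [hb x y hx (hys y (by simp))]
    by_cases h : b2 x y = true <;>
      simp [h, ih hx (fun z hz => hys z (by simp [hz]))]

lemma foldl_insertBy_congr {β : Type} (b1 b2 : β → β → Bool) (P : β → Prop)
    (hb : ∀ a b, P a → P b → b1 a b = b2 a b) :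
    ∀ (xs : List β) (acc : List β), (∀ x ∈ xs, P x) → (∀ y ∈ acc, P y) →
      xs.foldl (fun acc x => PySem.List.insertBy b1 x acc) acc
        = xs.foldl (fun acc x => PySem.List.insertBy b2 x acc) acc := by
  intro xs
  induction xs with
  | nil => intro acc _ _; rfl
  | cons x t ih =>
    intro acc hxs hacc
    simp only [List.foldl_cons]
    rw [insertBy_congr b1 b2 P hb x acc (hxs x (by simp)) hacc]
    exact ih _ (fun z hz => hxs z (by simp [hz]))
      (fun y hy => by
        rcases (PySem.List.insertBy_mem_iff b2 x y acc).1 hy with rfl | hy'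
        · exact hxs y (by simp)
        · exact hacc y hy')

lemma before_eq (a0 a1 b0 b1 : String) :
    (decide (a0 < b0) || (!decide (b0 < a0) && decide (a1 < b1)))
      = decide (([a0, a1] : List String) < [b0, b1]) := by
  rcases lt_trichotomy a0 b0 with h | rfl | h
  · simp [List.cons_lt_cons_iff, h]
  · simp [List.cons_lt_cons_iff]
  · simp [List.cons_lt_cons_iff, h, lt_asymm h, (ne_of_gt h)]

lemma sorted2_eq_sorted_id (xs : List (List String))
    (h : ∀ x ∈ xs, ∃ u v : String, x = [u, v]) :
    PySem.List.sorted2 xs (fun p => PySem.List.pyGetD p 0 "") (fun p => PySem.List.pyGetD p 1 "") false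
      = PySem.List.sorted xs (fun x => x) false := by
  show xs.foldl (fun acc x => PySem.List.insertBy _ x acc) []
      = xs.foldl (fun acc x => PySem.List.insertBy _ x acc) []
  apply foldl_insertBy_congr _ _ (fun x => ∃ u v : String, x = [u, v]) _ xs [] h (by simp)
  rintro a b ⟨u, v, rfl⟩ ⟨u', v', rfl⟩
  simpa [PySem.List.pyGetD, PySem.List.pyGet?, PySem.List.pyIdx?] using before_eq u v u' v'

-- adjacent dedup of a sorted list, keyed by the last emitted element
def pvDedupAfter (m : List String) : List (List String) → List (List String)
  | [] => []
  | p :: t => if p = m then pvDedupAfter m t else p :: pvDedupAfter p t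

lemma foldD_eq (s : List (List String)) : ∀ (l : List (List String)) (m : List String),
    s.foldl (fun out p =>
        if out = [] ∨ PySem.List.pyGetD out (-1) [] ≠ p then out ++ [p] else out) (l ++ [m])
      = (l ++ [m]) ++ pvDedupAfter m s := by
  induction s with
  | nil => intro l m; simp [pvDedupAfter]
  | cons p t ih =>
    intro l m
    by_cases h : p = m
    · subst h
      simp only [List.foldl_cons, pvDedupAfter]
      rw [if_neg (by simp)]
      exact ih l p
    · simp only [List.foldl_cons]
      rw [if_pos (Or.inr (by simp [Ne.symm h]))]
      have hrec := ih (l ++ [m]) p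
      have hd : pvDedupAfter m (p :: t) = p :: pvDedupAfter p t := by
        simp [pvDedupAfter, h]
      rw [hd]
      simp only [List.append_assoc] at hrec ⊢
      simpa using hrec

lemma pvDedupAfter_spec : ∀ (s : List (List String)) (m : List String),
    s.Pairwise (fun a b => ¬ b < a) → (∀ x ∈ s, ¬ x < m) →
    (pvDedupAfter m s).Pairwise (· < ·) ∧ (∀ x, x ∈ pvDedupAfter m s ↔ x ∈ s ∧ x ≠ m) := by
  intro s
  induction s with
  | nil => intro m _ _; simp [pvDedupAfter]
  | cons p t ih =>
    intro m hpw hm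
    have hpt : ∀ x ∈ t, ¬ x < p := fun x hx => (List.pairwise_cons.1 hpw).1 x hx
    have hpwt : t.Pairwise (fun a b => ¬ b < a) := (List.pairwise_cons.1 hpw).2
    by_cases h : p = m
    · subst h
      obtain ⟨h1, h2⟩ := ih p hpwt hpt
      have hme : pvDedupAfter p (p :: t) = pvDedupAfter p t := by simp [pvDedupAfter]
      rw [hme]
      refine ⟨h1, fun x => ?_⟩
      rw [h2 x]
      constructor
      · rintro ⟨hx, hne⟩; exact ⟨by simp [hx], hne⟩
      · rintro ⟨hx, hne⟩
        rcases List.mem_cons.1 hx with rfl | hx'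
        · exact absurd rfl hne
        · exact ⟨hx', hne⟩
    · obtain ⟨h1, h2⟩ := ih p hpwt hpt
      have hme : pvDedupAfter m (p :: t) = p :: pvDedupAfter p t := by
        simp [pvDedupAfter, h]
      rw [hme]
      have hlt : ∀ y ∈ pvDedupAfter p t, p < y := by
        intro y hy
        obtain ⟨hyt, hyp⟩ := (h2 y).1 hy
        rcases lt_trichotomy p y with hh | hh | hh
        · exact hh
        · exact absurd hh.symm hyp
        · exact absurd hh (hpt y hyt)
      constructor
      · exact List.pairwise_cons.2 ⟨hlt, h1⟩
      · intro x
        rw [List.mem_cons, h2 x]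
        constructor
        · rintro (rfl | ⟨hxt, hxp⟩)
          · exact ⟨by simp, h⟩
          · refine ⟨by simp [hxt], fun hxm => ?_⟩
            subst hxm
            rcases lt_trichotomy p x with hh | hh | hh
            · exact hm p (by simp) (hh.trans_le le_rfl) |>.elim
            · exact hxp hh.symm
            · exact hpt x hxt hh
        · rintro ⟨hx, hxm⟩
          rcases List.mem_cons.1 hx with rfl | hx'
          · exact Or.inl rfl
          · by_cases hxp : x = p
            · exact Or.inl hxp
            · exact Or.inr ⟨hx', hxp⟩

-- instance bridge: the port's sorted (core List LT) is the LinearOrder one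
lemma sorted_bridge (xs : List (List String)) :
    @PySem.List.sorted (List String) (List String) List.instLT (fun a b => a.decidableLT b) xs (fun x => x) false
      = @PySem.List.sorted (List String) (List String) List.instLinearOrder.toLT LinearOrder.toDecidableLT xs (fun x => x) false := by
  congr 1

-- B's dedup pass over the sorted batch produces sorted(dedup(batch))
lemma B_dedup_char (xs : List (List String)) :
    PySem.List.sorted (PySem.List.dedup xs) (fun x => x) false
      = (PySem.List.sorted xs (fun x => x) false).foldl (fun out p =>
          if out = [] ∨ PySem.List.pyGetD out (-1) [] ≠ p then out ++ [p] else out) [] := by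
  cases hs : PySem.List.sorted xs (fun x => x) false with
  | nil =>
    have hx : xs = [] := (PySem.List.sorted_eq_nil_iff _ _ _).1 hs
    subst hx
    rfl
  | cons p t =>
    have hlin : @PySem.List.sorted (List String) (List String) List.instLinearOrder.toLT
        LinearOrder.toDecidableLT xs (fun x => x) false = p :: t :=
      (sorted_bridge xs).symm.trans hs
    have hple : (p :: t).Pairwise (fun a b : List String => a ≤ b) := by
      have := PySem.List.sorted_pairwise xs (fun x : List String => x)
      rwa [hlin] at this
    have hpw : (p :: t).Pairwise (fun a b : List String => ¬ b < a) :=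
      hple.imp (fun h => not_lt.2 h)
    have hpt : ∀ x ∈ t, ¬ x < p := fun x hx => (List.pairwise_cons.1 hpw).1 x hx
    obtain ⟨h1, h2⟩ := pvDedupAfter_spec t p (List.pairwise_cons.1 hpw).2 hpt
    have hfold : (p :: t).foldl (fun out p =>
        if out = [] ∨ PySem.List.pyGetD out (-1) [] ≠ p then out ++ [p] else out) []
        = p :: pvDedupAfter p t := by
      rw [List.foldl_cons, if_pos (Or.inl rfl)]
      simpa using foldD_eq t [] p
    rw [hfold]
    have hlt : ∀ y ∈ pvDedupAfter p t, p < y := by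
      intro y hy
      obtain ⟨hyt, hyp⟩ := (h2 y).1 hy
      rcases lt_trichotomy p y with hh | hh | hh
      · exact hh
      · exact absurd hh.symm hyp
      · exact absurd hh (hpt y hyt)
    have hys_pw : (p :: pvDedupAfter p t).Pairwise (fun a b : List String => a < b) :=
      List.pairwise_cons.2 ⟨hlt, h1⟩
    have hmem : ∀ a : List String, a ∈ p :: pvDedupAfter p t ↔ a ∈ PySem.List.dedup xs := by
      intro a
      rw [PySem.List.mem_dedup, List.mem_cons, h2 a]
      have hms : a ∈ xs ↔ a ∈ p :: t := by
        rw [← PySem.List.mem_sorted xs (fun x : List String => x) false a, hs]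
      rw [hms, List.mem_cons]
      constructor
      · rintro (rfl | ⟨hx, _⟩)
        · exact Or.inl rfl
        · exact Or.inr hx
      · rintro (rfl | hx)
        · exact Or.inl rfl
        · by_cases hap : a = p
          · exact Or.inl hap
          · exact Or.inr ⟨hx, hap⟩
    have hnd : (p :: pvDedupAfter p t).Nodup := hys_pw.imp (fun h => ne_of_lt h)
    have hperm : (p :: pvDedupAfter p t).Perm (PySem.List.dedup xs) :=
      (List.perm_ext_iff_of_nodup hnd (PySem.List.nodup_dedup xs)).2 hmem
    rw [sorted_bridge]
    exact PySem.List.sorted_eq_of_perm_of_pairwise_lt _ _ _ hperm hys_pw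

-- ===== VERDICT (by name: the statement is the Claim_ definition above) =====
theorem compute_tight_coupling_pairs_py_spec : Claim_equal_compute_tight_coupling_pairs_py := by
  intro cds _
  unfold Spec_compute_tight_coupling_pairs_py
  show compute_tight_coupling_pairs_py cds = compute_tight_coupling_pairs_py_alt cds
  simp only [compute_tight_coupling_pairs_py, compute_tight_coupling_pairs_py_alt]
  rw [List.foldl_ext _ _ ([] : List (List String)) (fun acc c _ => stepA acc c)]
  rw [List.foldl_ext _ _ ([] : List (List String)) (fun acc c _ => stepB acc c)]
  rw [foldElim_eq, foldToList_eq]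
  have hA : (cds.filterMap pvPairOf).foldl PySem.Set.add ([] : List (List String))
      = PySem.List.dedup (cds.filterMap pvPairOf) := rfl
  rw [hA]
  have hshape : ∀ x ∈ PySem.List.dedup (cds.filterMap pvPairOf), ∃ u v : String, x = [u, v] := by
    intro x hx
    rw [PySem.List.mem_dedup] at hx
    obtain ⟨c, _, hc⟩ := List.mem_filterMap.1 hx
    exact pvPairOf_shape hc
  rw [sorted2_eq_sorted_id _ hshape]
  simpa using B_dedup_char (cds.filterMap pvPairOf)
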